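-- pv_equiv track=rewrite | github.com/shasankp000/Lexis | compression/pipeline/stage5_encode.py | decode_pos_sequence
-- ===== SOURCE A (Python) =====
-- from typing import Dict, List, Tuple, TypedDict
--
-- def decode_pos_sequence(
--     bitstring: str, huffman_codes: Dict[str, str]
-- ) -> List[str]:
--     """Decode Huffman-encoded POS bitstring back to tag sequence."""
--     if not bitstring or not huffman_codes:
--         return []
--     code_to_tag = {code: tag for tag, code in huffman_codes.items()}
--     decoded: List[str] = []
--     buffer = ""
--     for bit in bitstring:
--         buffer += bit
--         if buffer in code_to_tag:
--             decoded.append(code_to_tag[buffer])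
--             buffer = ""
--     return decoded
-- ===== SOURCE B (Python) =====
-- from typing import Dict, List
--
--
-- def decode_pos_sequence(
--     bitstring: str, huffman_codes: Dict[str, str]
-- ) -> List[str]:
--     """Decode by shortest-match jumps: at each position try only the distinct
--     code lengths (ascending) and hop forward by the matched length."""
--     code_to_tag = {code: tag for tag, code in huffman_codes.items()}
--     lengths = sorted({len(code) for code in code_to_tag if code})
--     decoded: List[str] = []
--     i, n = 0, len(bitstring)
--     while i < n:
--         for L in lengths:
--             chunk = bitstring[i:i + L]
--             if len(chunk) == L and chunk in code_to_tag:
--                 decoded.append(code_to_tag[chunk])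
--                 i += L
--                 break
--         else:
--             break
--     return decoded
-- ===== Notes on version B (the rewrite author's own statement) =====
-- stated objective: alternative
-- what changed: A grows a buffer bit-by-bit and hashes every growing prefix against the reversed code dict; B keeps an index into the bitstring and at each position probes only the distinct code lengths (ascending), jumping forward by the matched code length and stopping as soon as no length matches.
import Mathlib
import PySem

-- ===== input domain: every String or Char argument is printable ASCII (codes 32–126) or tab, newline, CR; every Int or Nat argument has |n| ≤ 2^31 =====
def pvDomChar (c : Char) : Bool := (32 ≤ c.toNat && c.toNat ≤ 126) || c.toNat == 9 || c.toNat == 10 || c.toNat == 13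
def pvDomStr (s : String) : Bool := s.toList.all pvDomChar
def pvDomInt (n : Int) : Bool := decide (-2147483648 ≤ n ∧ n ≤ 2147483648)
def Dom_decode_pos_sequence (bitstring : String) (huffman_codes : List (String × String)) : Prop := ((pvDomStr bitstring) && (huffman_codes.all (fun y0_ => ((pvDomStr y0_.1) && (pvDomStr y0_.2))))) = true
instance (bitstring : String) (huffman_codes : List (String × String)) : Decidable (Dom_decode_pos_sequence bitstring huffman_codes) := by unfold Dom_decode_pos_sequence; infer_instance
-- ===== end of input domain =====

-- B decodes by index jumps over the distinct code lengths instead of A's growing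
-- buffer with a hash probe per bit; equivalence is proved for all inputs (both total).

-- the Python dict argument: the association list materialised as a dict (last value per key wins)
def pyDictOfList (hc : List (String × String)) : PySem.Dict String String :=
  hc.foldl (fun d p => d.insert p.1 p.2) PySem.Dict.empty

-- code_to_tag = {code: tag for tag, code in huffman_codes.items()}  (shared line of both versions)
def codeToTag (hc : List (String × String)) : PySem.Dict String String :=
  (pyDictOfList hc).items.foldl (fun d p => d.insert p.2 p.1) PySem.Dict.empty

-- ===== PORT A =====
def decode_pos_sequence (bitstring : String) (huffman_codes : List (String × String)) : List String :=
  if bitstring = "" ∨ huffman_codes = [] then []   -- `not bitstring or not huffman_codes` (dict empty ↔ list empty)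
  else
    let code_to_tag := codeToTag huffman_codes
    let res := bitstring.toList.foldl
      (fun (st : List String × String) bit =>
        let buffer := st.2.push bit
        match code_to_tag.get? buffer with
        | some t => (st.1 ++ [t], "")
        | none => (st.1, buffer))
      ([], "")
    res.1

-- ===== PORT B =====
-- the inner `for L in lengths: … break / else: break`: first length whose chunk matches
def bFirst (rev : PySem.Dict String String) (lengths : List Int) (rest : List Char) :
    Option (String × Nat) :=
  match lengths with
  | [] => none
  | L :: ls =>
    let k := L.toNat
    let chunk := rest.take k
    match (if chunk.length = k then rev.get? (String.ofList chunk) else none) with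
    | some t => some (t, k)
    | none => bFirst rev ls rest

-- the `while i < n` loop; the suffix bitstring[i:] is carried as `rest`, the
-- fuel bounds the number of iterations (each match consumes k ≥ 1 characters)
def bGo (rev : PySem.Dict String String) (lengths : List Int) :
    Nat → List Char → List String
  | 0, _ => []
  | fuel + 1, rest =>
    match bFirst rev lengths rest with
    | some (t, k) => t :: bGo rev lengths fuel (rest.drop k)
    | none => []

def decode_pos_sequence_alt (bitstring : String) (huffman_codes : List (String × String)) : List String :=
  let code_to_tag := codeToTag huffman_codes
  let lengths := PySem.List.sorted
    (PySem.Set.ofList ((code_to_tag.keys.filter (fun c => c != "")).map PySem.Str.len))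
    (fun x => x)
  bGo code_to_tag lengths (bitstring.toList.length + 1) bitstring.toList

-- ===== PRECONDITION & SPEC =====
def Spec_decode_pos_sequence (bitstring : String) (huffman_codes : List (String × String)) (out : List String) : Prop := out = decode_pos_sequence_alt bitstring huffman_codes
instance (bitstring : String) (huffman_codes : List (String × String)) (out : List String) : Decidable (Spec_decode_pos_sequence bitstring huffman_codes out) := by unfold Spec_decode_pos_sequence; infer_instance

-- ===== CLAIM (what is proved, stated in full; the proofs are below) =====
def Claim_equal_decode_pos_sequence : Prop := ∀ (bitstring : String) (huffman_codes : List (String × String)), Dom_decode_pos_sequence bitstring huffman_codes → Spec_decode_pos_sequence bitstring huffman_codes (decode_pos_sequence bitstring huffman_codes)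

-- ===== LEMMAS AND PROOFS =====

-- A's loop, phrased as a buffer-carrying emitter
def emitA (rev : PySem.Dict String String) : List Char → List Char → List String
  | _, [] => []
  | buf, c :: cs =>
    match rev.get? (String.ofList (buf ++ [c])) with
    | some t => t :: emitA rev [] cs
    | none => emitA rev (buf ++ [c]) cs

lemma push_ofList (bl : List Char) (c : Char) :
    (String.ofList bl).push c = String.ofList (bl ++ [c]) := by
  refine String.toList_injective ?_
  simp [String.toList_push]

lemma foldA_eq_emitA (rev : PySem.Dict String String) (l : List Char)
    (dec : List String) (bl : List Char) :
    (l.foldl (fun (st : List String × String) bit =>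
        let buffer := st.2.push bit
        match rev.get? buffer with
        | some t => (st.1 ++ [t], "")
        | none => (st.1, buffer)) (dec, String.ofList bl)).1
      = dec ++ emitA rev bl l := by
  induction l generalizing dec bl with
  | nil => simp [emitA]
  | cons c cs ih =>
    simp only [List.foldl_cons, push_ofList, emitA]
    cases h : rev.get? (String.ofList (bl ++ [c])) with
    | some t =>
      have := ih (dec ++ [t]) []
      simpa using this
    | none =>
      exact ih dec (bl ++ [c])

-- the first hit of A's scan, when it is at offset k
lemma emitA_cons (rev : PySem.Dict String String) (buf : List Char) (c : Char) (cs : List Char) :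
    emitA rev buf (c :: cs) = match rev.get? (String.ofList (buf ++ [c])) with
      | some t => t :: emitA rev [] cs
      | none => emitA rev (buf ++ [c]) cs := rfl

lemma hitA (rev : PySem.Dict String String) (k : Nat) :
    ∀ (rest buf : List Char) (t : String), 0 < k → k ≤ rest.length →
    (∀ j : Nat, 0 < j → j < k → rev.get? (String.ofList (buf ++ rest.take j)) = none) →
    rev.get? (String.ofList (buf ++ rest.take k)) = some t →
    emitA rev buf rest = t :: emitA rev [] (rest.drop k) := by
  induction k with
  | zero => intro rest buf t h0; exact absurd h0 (lt_irrefl 0)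
  | succ k ih =>
    intro rest buf t _ hle hmiss hhit
    cases rest with
    | nil => simp at hle
    | cons c cs =>
      cases k with
      | zero =>
        simp only [List.take_succ_cons, List.take_zero] at hhit
        rw [emitA_cons, hhit]
        simp
      | succ k' =>
        have h1 : rev.get? (String.ofList (buf ++ [c])) = none := by
          have := hmiss 1 (by omega) (by omega)
          simpa using this
        have hstep : emitA rev buf (c :: cs) = emitA rev (buf ++ [c]) cs := by
          rw [emitA_cons, h1]
        rw [hstep]
        have hmiss' : ∀ j : Nat, 0 < j → j < k' + 1 →
            rev.get? (String.ofList ((buf ++ [c]) ++ cs.take j)) = none := by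
          intro j hj hjk
          have := hmiss (j + 1) (by omega) (by omega)
          simpa [List.take_succ_cons, List.append_assoc] using this
        have hhit' : rev.get? (String.ofList ((buf ++ [c]) ++ cs.take (k' + 1))) = some t := by
          simpa [List.take_succ_cons, List.append_assoc] using hhit
        have := ih cs (buf ++ [c]) t (by omega) (by simp at hle ⊢; omega) hmiss' hhit'
        simpa [List.drop_succ_cons] using this

lemma missA (rev : PySem.Dict String String) :
    ∀ (rest buf : List Char),
    (∀ j : Nat, 0 < j → j ≤ rest.length → rev.get? (String.ofList (buf ++ rest.take j)) = none) →
    emitA rev buf rest = [] := by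
  intro rest
  induction rest with
  | nil => intro buf _; simp [emitA]
  | cons c cs ih =>
    intro buf h
    have h1 : rev.get? (String.ofList (buf ++ [c])) = none := by
      have := h 1 (by omega) (by simp)
      simpa using this
    have hstep : emitA rev buf (c :: cs) = emitA rev (buf ++ [c]) cs := by
      rw [emitA_cons, h1]
    rw [hstep]
    apply ih
    intro j hj hjle
    have := h (j + 1) (by omega) (by simp; omega)
    simpa [List.take_succ_cons, List.append_assoc] using this

lemma bFirst_cons (rev : PySem.Dict String String) (L0 : Int) (ls : List Int) (rest : List Char) :
    bFirst rev (L0 :: ls) rest =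
      match (if (rest.take L0.toNat).length = L0.toNat
          then rev.get? (String.ofList (rest.take L0.toNat)) else none) with
      | some t => some (t, L0.toNat)
      | none => bFirst rev ls rest := rfl

lemma bFirst_none (rev : PySem.Dict String String) (lengths : List Int) (rest : List Char)
    (h : bFirst rev lengths rest = none) :
    ∀ L ∈ lengths, (rest.take L.toNat).length = L.toNat →
      rev.get? (String.ofList (rest.take L.toNat)) = none := by
  induction lengths with
  | nil => intro L hL; simp at hL
  | cons L0 ls ih =>
    cases hchk : (if (rest.take L0.toNat).length = L0.toNat
        then rev.get? (String.ofList (rest.take L0.toNat)) else none) with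
    | some t => rw [bFirst_cons, hchk] at h; simp at h
    | none =>
      have hrec : bFirst rev ls rest = none := by
        rw [bFirst_cons, hchk] at h
        simpa using h
      intro L hL hlen
      rcases List.mem_cons.1 hL with rfl | hmem
      · rw [if_pos hlen] at hchk
        exact hchk
      · exact ih hrec L hmem hlen

lemma bFirst_some (rev : PySem.Dict String String) (lengths : List Int)
    (hpos : ∀ L ∈ lengths, 0 < L) (hsort : lengths.Pairwise (· ≤ ·)) :
    ∀ (rest : List Char) (t : String) (k : Nat),
    bFirst rev lengths rest = some (t, k) →
    0 < k ∧ k ≤ rest.length ∧ rev.get? (String.ofList (rest.take k)) = some t ∧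
      (∀ j : Nat, 0 < j → j < k → ((j : Int) ∈ lengths) →
        rev.get? (String.ofList (rest.take j)) = none) := by
  induction lengths with
  | nil => intro rest t k hb; simp [bFirst] at hb
  | cons L0 ls ih =>
    intro rest t k hb
    have hL0pos : 0 < L0 := hpos L0 List.mem_cons_self
    have hle : ∀ L ∈ ls, L0 ≤ L := (List.pairwise_cons.1 hsort).1
    cases hchk : (if (rest.take L0.toNat).length = L0.toNat
        then rev.get? (String.ofList (rest.take L0.toNat)) else none) with
    | some t' =>
      rw [bFirst_cons, hchk] at hb
      simp only [Option.some.injEq, Prod.mk.injEq] at hb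
      obtain ⟨rfl, rfl⟩ := hb
      have hcond : (rest.take L0.toNat).length = L0.toNat := by
        by_contra hc
        rw [if_neg hc] at hchk
        simp at hchk
      rw [if_pos hcond] at hchk
      refine ⟨by omega, ?_, hchk, ?_⟩
      · rw [List.length_take] at hcond
        omega
      · intro j hj hjk hjmem
        rcases List.mem_cons.1 hjmem with hj0 | hmem
        · exfalso; omega
        · exfalso
          have := hle (j : Int) hmem
          omega
    | none =>
      have hrec : bFirst rev ls rest = some (t, k) := by
        rw [bFirst_cons, hchk] at hb
        simpa using hb
      have ihh := ih (fun L hL => hpos L (List.mem_cons_of_mem _ hL))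
        (List.Pairwise.sublist (List.sublist_cons_self _ _) hsort) rest t k hrec
      obtain ⟨hk0, hkle, hget, hmin⟩ := ihh
      refine ⟨hk0, hkle, hget, ?_⟩
      intro j hj hjk hjmem
      rcases List.mem_cons.1 hjmem with hj0 | hmem
      · have hjt : L0.toNat = j := by omega
        have hcond : (rest.take L0.toNat).length = L0.toNat := by
          rw [List.length_take]
          omega
        rw [if_pos hcond] at hchk
        rw [hjt] at hchk
        exact hchk
      · exact hmin j hj hjk hmem

-- the key closure fact: any string A's probe can hit has its length in `lengths`
def GoodLens (rev : PySem.Dict String String) (lengths : List Int) : Prop :=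
  ∀ (s : String) (t : String), rev.get? s = some t → s.toList ≠ [] →
    ((s.toList.length : Int) ∈ lengths)

lemma emitA_eq_bGo (rev : PySem.Dict String String) (lengths : List Int)
    (hpos : ∀ L ∈ lengths, 0 < L) (hsort : lengths.Pairwise (· ≤ ·))
    (hgood : GoodLens rev lengths) :
    ∀ (n : Nat) (rest : List Char) (fuel : Nat), rest.length ≤ n → rest.length < fuel →
    emitA rev [] rest = bGo rev lengths fuel rest := by
  intro n
  induction n with
  | zero =>
    intro rest fuel hn hfuel
    have hrest : rest = [] := List.eq_nil_of_length_eq_zero (by omega)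
    subst hrest
    obtain ⟨f, rfl⟩ : ∃ f, fuel = f + 1 := ⟨fuel - 1, by omega⟩
    cases hb : bFirst rev lengths [] with
    | some p =>
      obtain ⟨hk0, hkle, -, -⟩ :=
        bFirst_some rev lengths hpos hsort [] p.1 p.2 (by simpa using hb)
      simp at hkle
      omega
    | none => simp [emitA, bGo, hb]
  | succ n ih =>
    intro rest fuel hn hfuel
    obtain ⟨f, rfl⟩ : ∃ f, fuel = f + 1 := ⟨fuel - 1, by omega⟩
    cases hb : bFirst rev lengths rest with
    | none =>
      have hgo : bGo rev lengths (f + 1) rest = [] := by simp [bGo, hb]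
      rw [hgo]
      apply missA
      intro j hj hjle
      by_contra hne
      obtain ⟨t, hsome⟩ := Option.ne_none_iff_exists'.1 hne
      rw [List.nil_append] at hsome
      have hlen : (rest.take j).length = j := by rw [List.length_take]; omega
      have hmem : ((j : Int) ∈ lengths) := by
        have := hgood (String.ofList (rest.take j)) t hsome
          (by rw [String.toList_ofList]; exact List.ne_nil_of_length_pos (by rw [hlen]; exact hj))
        simpa [String.toList_ofList, hlen] using this
      have hnone := bFirst_none rev lengths rest hb (j : Int) hmem
        (by simpa using hlen)
      rw [Int.toNat_natCast] at hnone
      rw [hsome] at hnone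
      simp at hnone
    | some p =>
      obtain ⟨t, k⟩ := p
      obtain ⟨hk0, hkle, hget, hmin⟩ := bFirst_some rev lengths hpos hsort rest t k hb
      have hgo : bGo rev lengths (f + 1) rest = t :: bGo rev lengths f (rest.drop k) := by
        simp [bGo, hb]
      rw [hgo]
      have hmiss : ∀ j : Nat, 0 < j → j < k →
          rev.get? (String.ofList ([] ++ rest.take j)) = none := by
        intro j hj hjk
        rw [List.nil_append]
        by_contra hne
        obtain ⟨t', hsome⟩ := Option.ne_none_iff_exists'.1 hne
        have hlen : (rest.take j).length = j := by rw [List.length_take]; omega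
        have hmem : ((j : Int) ∈ lengths) := by
          have := hgood (String.ofList (rest.take j)) t' hsome
            (by rw [String.toList_ofList]; exact List.ne_nil_of_length_pos (by rw [hlen]; exact hj))
          simpa [String.toList_ofList, hlen] using this
        have := hmin j hj hjk hmem
        rw [hsome] at this
        simp at this
      rw [hitA rev k rest [] t hk0 hkle hmiss (by simpa using hget)]
      congr 1
      exact ih (rest.drop k) f (by rw [List.length_drop]; omega)
        (by rw [List.length_drop]; omega)

-- the actual `lengths` of B satisfies the three hypotheses
lemma lengths_pos (hc : List (String × String)) :
    ∀ L ∈ PySem.List.sorted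
      (PySem.Set.ofList (((codeToTag hc).keys.filter (fun c => c != "")).map PySem.Str.len))
      (fun x => x), 0 < L := by
  intro L hmem
  have h1 : L ∈ PySem.Set.ofList
      (((codeToTag hc).keys.filter (fun c => c != "")).map PySem.Str.len) :=
    ((PySem.List.sorted_perm _ _ _).mem_iff).1 hmem
  have h2 := (PySem.Set.mem_ofList _ _).1 h1
  obtain ⟨c, hc1, hc2⟩ := List.mem_map.1 h2
  have hcne : c ≠ "" := by
    have := (List.mem_filter.1 hc1).2
    simpa using this
  have : c.toList ≠ [] := fun h => hcne (by
    have := congrArg String.ofList h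
    simpa using this)
  have hlen : 0 < c.toList.length := List.length_pos_iff.2 this
  rw [← hc2, PySem.Str.len_eq]
  exact_mod_cast hlen

lemma lengths_good (hc : List (String × String)) :
    GoodLens (codeToTag hc)
      (PySem.List.sorted
        (PySem.Set.ofList (((codeToTag hc).keys.filter (fun c => c != "")).map PySem.Str.len))
        (fun x => x)) := by
  intro s t hget hne
  have hkey : s ∈ (codeToTag hc).keys := by
    by_contra hnk
    rw [(PySem.Dict.get?_eq_none_iff_not_mem_keys _ _).2 hnk] at hget
    simp at hget
  have hsne : s ≠ "" := fun h => hne (by simp [h])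
  have hfil : s ∈ (codeToTag hc).keys.filter (fun c => c != "") :=
    List.mem_filter.2 ⟨hkey, by simpa using hsne⟩
  have hmap : PySem.Str.len s ∈
      ((codeToTag hc).keys.filter (fun c => c != "")).map PySem.Str.len :=
    List.mem_map_of_mem hfil
  have hset := (PySem.Set.mem_ofList _ _).2 hmap
  have hmem := ((PySem.List.sorted_perm
      (PySem.Set.ofList (((codeToTag hc).keys.filter (fun c => c != "")).map PySem.Str.len))
      (fun x : Int => x) false).mem_iff).2 hset
  have h2 : ((s.toList.length : Int)) = PySem.Str.len s := (PySem.Str.len_eq s).symm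
  rw [h2]
  exact hmem

-- ===== VERDICT (by name: the statement is the Claim_ definition above) =====
lemma emitA_empty : ∀ (l buf : List Char),
    emitA (PySem.Dict.empty : PySem.Dict String String) buf l = [] := by
  intro l buf
  apply missA
  intro j _ _
  exact PySem.Dict.get?_empty _

lemma alt_eq_emitA (bs : String) (hc : List (String × String)) :
    decode_pos_sequence_alt bs hc = emitA (codeToTag hc) [] bs.toList := by
  have hsort := PySem.List.sorted_pairwise
    (PySem.Set.ofList (((codeToTag hc).keys.filter (fun c => c != "")).map PySem.Str.len))
    (fun x => x)
  exact (emitA_eq_bGo (codeToTag hc) _ (lengths_pos hc) hsort (lengths_good hc)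
    bs.toList.length bs.toList (bs.toList.length + 1) le_rfl (by omega)).symm

theorem decode_pos_sequence_spec : Claim_equal_decode_pos_sequence := by
  intro bs hc _
  show decode_pos_sequence bs hc = decode_pos_sequence_alt bs hc
  rw [alt_eq_emitA]
  unfold decode_pos_sequence
  split_ifs with h
  · rcases h with h | h
    · subst h
      simp [emitA]
    · subst h
      have hct : codeToTag [] = PySem.Dict.empty := rfl
      rw [hct, emitA_empty]
  · have := foldA_eq_emitA (codeToTag hc) bs.toList [] []
    simpa using this
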